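-- pv_equiv track=rewrite | github.com/maurimorero/Ejercicios | Topt.py | solution
-- ===== SOURCE A (Python) =====
-- def solution (A):
--     list=A.split(',')
--     count=1
--     counts=[]
--     flag=0
--
--     for ind in range (0,(len(list)-1)):
--         #print (str(list[ind])[2:3])
--         if((str(list[ind])[2:3])==(str(list[ind+1])[0:1])):
--             count +=1
--             flag=1
--         else:
--             counts.append(count)
--             count=1
--             flag = 0
--
--     if (flag==1):
--         counts.append(count)
--
--     if( len(list)==1):
--         return 1
--
--     if (len(counts)==0):
--         return 0
--     return max(counts)
-- ===== SOURCE B (Python) =====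
-- def solution(A):
--     lst = A.split(',')
--     n = len(lst)
--     matches = [str(lst[i])[2:3] == str(lst[i + 1])[0:1] for i in range(n - 1)]
--     cuts = [-1] + [i for i, m in enumerate(matches) if not m] + [n - 1]
--     return max(b - a for a, b in zip(cuts, cuts[1:]))
-- ===== Notes on version B (the rewrite author's own statement) =====
-- stated objective: alternative
-- what changed: Replaces A's inline count/flag/counts run-tracking loop with an explicit adjacency-match table, the list of mismatch positions (cut points), and a single max over gaps between consecutive cuts.
import Mathlib
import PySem

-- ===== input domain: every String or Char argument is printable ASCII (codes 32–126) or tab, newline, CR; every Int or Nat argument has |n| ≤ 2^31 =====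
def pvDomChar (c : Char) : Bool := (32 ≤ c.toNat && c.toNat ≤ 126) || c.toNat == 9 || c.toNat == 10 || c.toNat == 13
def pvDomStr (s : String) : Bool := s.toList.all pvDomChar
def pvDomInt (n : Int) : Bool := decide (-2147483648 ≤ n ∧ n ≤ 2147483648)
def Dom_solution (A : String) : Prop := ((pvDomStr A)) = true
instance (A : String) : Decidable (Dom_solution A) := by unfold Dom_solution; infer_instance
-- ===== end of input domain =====

-- B replaces A's inline count/flag/counts bookkeeping by an explicit cut-position list (mismatch
-- indices) and one max over gaps between consecutive cuts — an alternative of the same cost.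

-- ===== PORT A =====
-- A.split(',') : sep is the non-empty literal ",", so split? is always `some`; getD's default is unreachable.
def solution (A : String) : Int :=
  let lst := (PySem.Str.split? A ",").getD []
  let st := (PySem.List.pyRange 0 ((lst.length : Int) - 1) 1).foldl
    (fun (s : Int × List Int × Int) ind =>
      if PySem.Str.slice (PySem.List.pyGetD lst ind "") (some 2) (some 3)
           == PySem.Str.slice (PySem.List.pyGetD lst (ind + 1) "") (some 0) (some 1)
      then (s.1 + 1, s.2.1, 1)
      else (1, s.2.1 ++ [s.1], 0))
    (1, [], 0)
  let counts := if st.2.2 == 1 then st.2.1 ++ [st.1] else st.2.1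
  if lst.length == 1 then 1
  else if counts.length == 0 then 0
  else match PySem.List.max? counts (fun x => x) with
       | some m => m
       | none => 0    -- unreachable: counts ≠ [] in this branch (Python max of a non-empty list)

-- ===== PORT B =====
def solution_alt (A : String) : Int :=
  let lst := (PySem.Str.split? A ",").getD []
  let n : Int := lst.length
  let mlist := (PySem.List.pyRange 0 (n - 1) 1).map (fun i =>
      PySem.Str.slice (PySem.List.pyGetD lst i "") (some 2) (some 3)
        == PySem.Str.slice (PySem.List.pyGetD lst (i + 1) "") (some 0) (some 1))
  let cuts : List Int :=
    [-1] ++ ((PySem.List.enumerate mlist 0).filter (fun p => !p.2)).map (fun p => p.1) ++ [n - 1]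
  let diffs := (cuts.zip cuts.tail).map (fun p => p.2 - p.1)
  match PySem.List.max? diffs (fun x => x) with
  | some m => m
  | none => 0    -- unreachable: cuts has ≥ 2 elements, so diffs ≠ []

-- ===== PRECONDITION & SPEC =====
def Spec_solution (A : String) (out : Int) : Prop := out = solution_alt A
instance (A : String) (out : Int) : Decidable (Spec_solution A out) := by unfold Spec_solution; infer_instance

-- ===== CLAIM (what is proved, stated in full; the proofs are below) =====
def Claim_equal_solution : Prop := ∀ (A : String), Dom_solution A → Spec_solution A (solution A)

-- ===== LEMMAS AND PROOFS =====

-- A's loop body, on the boolean outcome of the adjacency test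
def stepA (s : Int × List Int × Int) (b : Bool) : Int × List Int × Int :=
  if b then (s.1 + 1, s.2.1, 1) else (1, s.2.1 ++ [s.1], 0)

-- the run lengths A appends to `counts` (including the flag-driven final append)
def runsA (c : Int) (f : Bool) : List Bool → List Int
  | [] => if f then [c] else []
  | true :: t => runsA (c + 1) true t
  | false :: t => c :: runsA 1 false t

-- B's gap sequence, in run form
def gapsB (c : Int) : List Bool → List Int
  | [] => [c]
  | true :: t => gapsB (c + 1) t
  | false :: t => c :: gapsB 1 t

-- B's cut positions after the initial -1, with next absolute index s
def cutsB (s : Int) : List Bool → List Int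
  | [] => [s]
  | true :: t => cutsB (s + 1) t
  | false :: t => s :: cutsB (s + 1) t

-- successive differences against a previous element
def difs (p : Int) : List Int → List Int
  | [] => []
  | x :: t => (x - p) :: difs x t

-- Python max(l) with the ports' (unreachable) none-default
def maxD0 (l : List Int) : Int :=
  match PySem.List.max? l (fun x => x) with
  | some m => m
  | none => 0

theorem foldl_stepA (ms : List Bool) : ∀ (c : Int) (cs : List Int) (f : Int),
    (if (ms.foldl stepA (c, cs, f)).2.2 == 1
     then (ms.foldl stepA (c, cs, f)).2.1 ++ [(ms.foldl stepA (c, cs, f)).1]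
     else (ms.foldl stepA (c, cs, f)).2.1) = cs ++ runsA c (f == 1) ms := by
  induction ms with
  | nil =>
    intro c cs f
    simp only [List.foldl_nil, runsA]
    by_cases h : f = 1 <;> simp [h]
  | cons b t ih =>
    intro c cs f
    cases b with
    | true => simpa [stepA, runsA] using ih (c + 1) cs 1
    | false => simpa [stepA, runsA] using ih 1 (cs ++ [c]) 0

theorem enumerate_filter_cutsB (ms : List Bool) : ∀ (s : Int),
    ((PySem.List.enumerate ms s).filter (fun p => !p.2)).map (fun p => p.1)
      ++ [s + ms.length] = cutsB s ms := by
  induction ms with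
  | nil => intro s; simp [PySem.List.enumerate, cutsB]
  | cons b t ih =>
    intro s
    rw [PySem.List.enumerate_cons]
    cases b with
    | true =>
      simp only [List.filter_cons, cutsB]
      norm_num
      rw [show s + ((t.length : Int) + 1) = (s + 1) + t.length by ring]
      exact ih (s + 1)
    | false =>
      simp only [List.filter_cons, cutsB]
      norm_num
      rw [show s + ((t.length : Int) + 1) = (s + 1) + t.length by ring]
      exact ih (s + 1)

theorem zip_tail_difs (l : List Int) : ∀ (p : Int),
    (((p :: l).zip l).map (fun q => q.2 - q.1)) = difs p l := by
  induction l with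
  | nil => intro p; simp [difs]
  | cons x t ih => intro p; simp [difs, ih x]

theorem difs_cutsB (ms : List Bool) : ∀ (s p : Int), difs p (cutsB s ms) = gapsB (s - p) ms := by
  induction ms with
  | nil => intro s p; simp [cutsB, difs, gapsB]
  | cons b t ih =>
    intro s p
    cases b with
    | true =>
      simp only [cutsB, gapsB, ih]
      rw [show s + 1 - p = s - p + 1 by ring]
    | false =>
      simp only [cutsB, difs, gapsB, ih]
      rw [show s + 1 - s = (1 : Int) by ring]

-- whether the match list ends in a mismatch (False)
def endsFalse : List Bool → Bool
  | [] => false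
  | [b] => !b
  | _ :: t => endsFalse t

theorem runsA_flag_irrel (b : Bool) (t : List Bool) (c : Int) (f f' : Bool) :
    runsA c f (b :: t) = runsA c f' (b :: t) := by cases b <;> simp [runsA]

theorem gapsB_endsFalse (ms : List Bool) : ∀ (c : Int) (f : Bool), endsFalse ms = true →
    gapsB c ms = runsA c f ms ++ [1] := by
  induction ms with
  | nil => intro c f h; simp [endsFalse] at h
  | cons b t ih =>
    intro c f h
    cases b with
    | true =>
      cases t with
      | nil => simp [endsFalse] at h
      | cons b' t' =>
        simp only [endsFalse] at h
        simp only [gapsB, runsA]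
        exact ih (c + 1) true h
    | false =>
      cases t with
      | nil => simp [gapsB, runsA]
      | cons b' t' =>
        simp only [endsFalse] at h
        simp only [gapsB, runsA]
        rw [ih 1 false h]
        simp

theorem gapsB_endsTrue (ms : List Bool) : ∀ (c : Int) (f : Bool), ms ≠ [] → endsFalse ms = false →
    gapsB c ms = runsA c f ms := by
  induction ms with
  | nil => intro c f h _; exact absurd rfl h
  | cons b t ih =>
    intro c f _ h
    cases b with
    | true =>
      cases t with
      | nil => simp [gapsB, runsA]
      | cons b' t' =>
        simp only [endsFalse] at h
        simp only [gapsB, runsA]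
        exact ih (c + 1) true (by simp) h
    | false =>
      cases t with
      | nil => simp [endsFalse] at h
      | cons b' t' =>
        simp only [endsFalse] at h
        simp only [gapsB, runsA]
        rw [ih 1 false (by simp) h]

theorem runsA_true_ne_nil (ms : List Bool) : ∀ (c : Int), runsA c true ms ≠ [] := by
  induction ms with
  | nil => intro c; simp [runsA]
  | cons b t ih => intro c; cases b <;> simp [runsA]; exact ih (c + 1)

theorem runsA_ne_nil (b : Bool) (t : List Bool) (c : Int) (f : Bool) :
    runsA c f (b :: t) ≠ [] := by
  cases b
  · simp [runsA]
  · simp only [runsA]; exact runsA_true_ne_nil t (c + 1)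

theorem runsA_ge_one (ms : List Bool) : ∀ (c : Int) (f : Bool), 1 ≤ c →
    ∀ x ∈ runsA c f ms, 1 ≤ x := by
  induction ms with
  | nil =>
    intro c f hc x hx
    cases f <;> simp [runsA] at hx
    omega
  | cons b t ih =>
    intro c f hc x hx
    cases b with
    | true => exact ih (c + 1) true (by omega) x (by simpa [runsA] using hx)
    | false =>
      simp only [runsA, List.mem_cons] at hx
      rcases hx with rfl | hx
      · exact hc
      · exact ih 1 false le_rfl x hx

theorem maxD0_append_one (h : Int) (t : List Int) (h1 : 1 ≤ h) :
    maxD0 ((h :: t) ++ [1]) = maxD0 (h :: t) := by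
  simp only [maxD0, List.cons_append, PySem.List.max?_id_cons, List.foldl_append]
  simp only [List.foldl_cons, List.foldl_nil]
  have := (PySem.List.le_foldl_max t h).1
  omega

-- the two final expressions agree on any non-empty match list
theorem maxD0_gapsB_runsA (b : Bool) (t : List Bool) :
    maxD0 (gapsB 1 (b :: t)) = maxD0 (runsA 1 false (b :: t)) := by
  cases hEnd : endsFalse (b :: t) with
  | true =>
    rw [gapsB_endsFalse (b :: t) 1 false hEnd]
    rcases h : runsA 1 false (b :: t) with _ | ⟨x, xs⟩
    · exact absurd h (runsA_ne_nil b t 1 false)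
    · have hx : 1 ≤ x := runsA_ge_one (b :: t) 1 false le_rfl x (by rw [h]; exact List.mem_cons_self ..)
      exact maxD0_append_one x xs hx
  | false =>
    rw [gapsB_endsTrue (b :: t) 1 false (by simp) hEnd]

-- abstract core: both ports as a function of the shared match list and list length
theorem core_eq (ms : List Bool) (L : Nat) (hL : 2 ≤ L) (hlen : (ms.length : Int) = (L : Int) - 1) :
    (if L == 1 then (1 : Int)
     else if (if (ms.foldl stepA (1, [], 0)).2.2 == 1
              then (ms.foldl stepA (1, [], 0)).2.1 ++ [(ms.foldl stepA (1, [], 0)).1]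
              else (ms.foldl stepA (1, [], 0)).2.1).length == 0 then 0
     else maxD0 (if (ms.foldl stepA (1, [], 0)).2.2 == 1
                 then (ms.foldl stepA (1, [], 0)).2.1 ++ [(ms.foldl stepA (1, [], 0)).1]
                 else (ms.foldl stepA (1, [], 0)).2.1)) =
    maxD0 ((((-1 :: ((((PySem.List.enumerate ms 0).filter (fun p => !p.2)).map (fun p => p.1))
        ++ [(L : Int) - 1])).zip (((((PySem.List.enumerate ms 0).filter (fun p => !p.2)).map
        (fun p => p.1)) ++ [(L : Int) - 1]))).map (fun q => q.2 - q.1))) := by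
  rcases ms with _ | ⟨b, t⟩
  · simp at hlen; omega
  have hcuts : ((((PySem.List.enumerate (b :: t) 0).filter (fun p => !p.2)).map (fun p => p.1))
      ++ [(L : Int) - 1]) = cutsB 0 (b :: t) := by
    rw [← hlen, show (((b :: t).length : Int)) = 0 + (((b :: t).length : Int)) by ring]
    exact enumerate_filter_cutsB (b :: t) 0
  rw [hcuts, zip_tail_difs (cutsB 0 (b :: t)) (-1), difs_cutsB (b :: t) 0 (-1),
      show (0 : Int) - (-1) = 1 by ring]
  rw [foldl_stepA (b :: t) 1 [] 0]
  simp only [List.nil_append]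
  rw [if_neg (by simpa using (by omega : L ≠ 1))]
  rw [if_neg (by
        simp only [beq_iff_eq, List.length_eq_zero_iff]
        rw [runsA_flag_irrel b t 1 _ false]
        exact runsA_ne_nil b t 1 false)]
  rw [runsA_flag_irrel b t 1 _ false]
  exact (maxD0_gapsB_runsA b t).symm

-- A's loop rewritten as a fold of stepA over the match list (List.foldl_map)
theorem fold_port (lst : List String) :
    (PySem.List.pyRange 0 ((lst.length : Int) - 1) 1).foldl
      (fun (s : Int × List Int × Int) ind =>
        if PySem.Str.slice (PySem.List.pyGetD lst ind "") (some 2) (some 3)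
             == PySem.Str.slice (PySem.List.pyGetD lst (ind + 1) "") (some 0) (some 1)
        then (s.1 + 1, s.2.1, 1)
        else (1, s.2.1 ++ [s.1], 0)) (1, [], 0) =
    ((PySem.List.pyRange 0 ((lst.length : Int) - 1) 1).map (fun i =>
        PySem.Str.slice (PySem.List.pyGetD lst i "") (some 2) (some 3)
          == PySem.Str.slice (PySem.List.pyGetD lst (i + 1) "") (some 0) (some 1))).foldl
      stepA (1, [], 0) := by
  rw [List.foldl_map]; rfl

-- ===== VERDICT (by name: the statement is the Claim_ definition above) =====
theorem solution_spec : Claim_equal_solution := by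
  intro A _
  unfold Spec_solution solution solution_alt
  dsimp only
  generalize (PySem.Str.split? A ",").getD [] = lst
  rw [fold_port lst]
  rcases hL : lst.length with _ | _ | L
  · norm_num
    rfl
  · norm_num
    rfl
  · refine core_eq _ (L + 2) (by omega) ?_
    simp only [List.length_map, PySem.List.length_pyRange_one]
    push_cast
    omega
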